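-- pv_equiv track=rewrite | github.com/sg45000/atcoder | typical90_z/main.py | solve
-- ===== SOURCE A (Python) =====
-- from collections import deque
--
-- class Node:
--     def __init__(self, value) -> None:
--         self.value = value
--         self.child_nodes = []
--
-- def make_tree(N, graph):
--     q = deque()
--     node = Node(1)
--
--     q.append(node)
--     solved = [False] * (N + 1)
--     while len(q) > 0:
--         current = q.popleft()
--         child_values = graph[current.value]
--         for child_value in child_values:
--             if solved[child_value]:
--                 continue
--             else:
--                 solved[child_value] = True
--             child_node = Node(child_value)
--             current.child_nodes.append(child_node)
--             q.append(child_node)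
--     return node
--
-- def solve(N, edges):
--     graph = [[] for _ in range(0, N + 1)]
--     for edge in edges:
--         graph[edge[0]].append(edge[1])
--         graph[edge[1]].append(edge[0])
--     tree = make_tree(N, graph)
--     q = deque()
--     q.append(tree)
--     answer = []
--     count = 0
--     while len(q) > 0:
--         current = q.popleft()
--         for child_node in current.child_nodes:
--             if count % 2 != 0:
--                 answer.append(child_node.value)
--             q.append(child_node)
--         count += 1
--     return answer
-- ===== SOURCE B (Python) =====
-- from collections import deque
--
-- def solve(N, edges):
--     graph = [[] for _ in range(0, N + 1)]
--     for edge in edges: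
--         graph[edge[0]].append(edge[1])
--         graph[edge[1]].append(edge[0])
--     # Single BFS over node values.  A node counts as visited once it has been
--     # discovered as somebody's neighbour; each discovery is recorded (and the
--     # node enqueued), and discoveries made during an odd-numbered pop go into
--     # the answer.
--     discovered = [False] * (N + 1)
--     q = deque([1])
--     answer = []
--     index = 0
--     while q:
--         v = q.popleft()
--         for w in graph[v]:
--             if not discovered[w]:
--                 discovered[w] = True
--                 q.append(w)
--                 if index % 2 == 1:
--                     answer.append(w)
--         index += 1
--     return answer
-- ===== Notes on version B (the rewrite author's own statement) =====
-- stated objective: simpler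
-- what changed: B replaces A's two-phase design (build an explicit Node tree by BFS, then BFS that tree collecting child values at odd pop counters) with a single discovery-marking BFS over node values that records newly discovered neighbours directly, eliminating the Node class and the second traversal.
import Mathlib
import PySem

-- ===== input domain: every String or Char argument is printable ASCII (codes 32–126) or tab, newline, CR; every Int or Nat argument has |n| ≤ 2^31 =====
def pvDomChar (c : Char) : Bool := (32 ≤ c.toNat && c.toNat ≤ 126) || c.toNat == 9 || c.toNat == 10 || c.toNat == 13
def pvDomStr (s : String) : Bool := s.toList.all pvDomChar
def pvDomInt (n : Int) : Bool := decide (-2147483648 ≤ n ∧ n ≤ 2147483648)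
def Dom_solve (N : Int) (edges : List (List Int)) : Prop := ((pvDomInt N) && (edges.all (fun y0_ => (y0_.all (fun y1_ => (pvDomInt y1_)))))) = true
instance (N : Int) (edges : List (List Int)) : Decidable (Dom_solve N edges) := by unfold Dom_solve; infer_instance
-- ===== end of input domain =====

-- B replaces A's two-phase design (explicit Node tree, then a second BFS) with one
-- discovery-marking BFS over node values; equality of RETURN values.

-- ===== PORT A =====
-- graph[a].append(b) (wrap-around index like Python; out-of-range is an IndexError, excluded by Pre_solve)
def pvAddEdge (g : List (List Int)) (a b : Int) : List (List Int) :=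
  PySem.List.pySetD g a (PySem.List.pyGetD g a [] ++ [b])

-- graph building loop shared verbatim by both Python versions
def pvGraph (N : Int) (edges : List (List Int)) : List (List Int) :=
  edges.foldl (fun g e =>
      pvAddEdge (pvAddEdge g (PySem.List.pyGetD e 0 0) (PySem.List.pyGetD e 1 0))
        (PySem.List.pyGetD e 1 0) (PySem.List.pyGetD e 0 0))
    ((PySem.List.pyRange 0 (N + 1) 1).map (fun _ => ([] : List Int)))

-- make_tree's inner for-loop body; nodes are heap objects represented by creation index:
-- nodes[i] = (value, child indices).  i is the index of `current`.
-- pyIdx? none = Python IndexError on solved[child_value]; excluded by Pre_solve.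
def pvMkStep (i : Nat) (st : List (Int × List Nat) × List Nat × List Bool) (cv : Int) :
    List (Int × List Nat) × List Nat × List Bool :=
  match PySem.List.pyIdx? st.2.2.length cv with
  | none => st
  | some j =>
    if st.2.2.getD j false then st
    else ((st.1.modify i (fun p => (p.1, p.2 ++ [st.1.length]))) ++ [(cv, [])],
          st.2.1 ++ [st.1.length], st.2.2.set j true)

theorem pvIdx_lt {n : Nat} {i : Int} {j : Nat} (h : PySem.List.pyIdx? n i = some j) :
    j < n := by
  simp only [PySem.List.pyIdx?] at h
  split_ifs at h <;> simp_all <;> omega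

theorem pvGetD_false {l : List Bool} {j : Nat} (hj : j < l.length) :
    l.getD j false = l[j] := by
  simp [List.getD_eq_getElem?_getD, List.getElem?_eq_getElem hj]

theorem pvCount_set {l : List Bool} {j : Nat} (hj : j < l.length) (hf : l[j] = false) :
    (l.set j true).count false + 1 = l.count false := by
  rw [List.count_set (a := true) (b := false) hj]
  have h1 : 0 < l.count false := List.count_pos_iff.mpr (hf ▸ List.getElem_mem hj)
  simp [hf]
  omega

theorem pvMkStep_measure (i : Nat) (cvs : List Int)
    (st : List (Int × List Nat) × List Nat × List Bool) :
    2 * (cvs.foldl (pvMkStep i) st).2.2.count false + (cvs.foldl (pvMkStep i) st).2.1.length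
      ≤ 2 * st.2.2.count false + st.2.1.length := by
  induction cvs generalizing st with
  | nil => simp [List.foldl]
  | cons cv cvs ih =>
    refine le_trans (ih _) ?_
    show 2 * (pvMkStep i st cv).2.2.count false + (pvMkStep i st cv).2.1.length ≤ _
    unfold pvMkStep
    rcases h : PySem.List.pyIdx? st.2.2.length cv with _ | j
    · simp
    · have hj : j < st.2.2.length := pvIdx_lt h
      simp only [pvGetD_false hj]
      rcases hf : st.2.2[j] with _ | _
      · have hc := pvCount_set hj hf
        simp [hf]
        omega
      · simp [hf]

-- make_tree's BFS loop
def pvMakeTree (graph : List (List Int)) (nodes : List (Int × List Nat)) (q : List Nat)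
    (solved : List Bool) : List (Int × List Nat) :=
  match q with
  | [] => nodes
  | i :: q' =>
    let cvs := PySem.List.pyGetD graph ((nodes.getD i (0, [])).1) []
    let st := cvs.foldl (pvMkStep i) (nodes, q', solved)
    pvMakeTree graph st.1 st.2.1 st.2.2
termination_by 2 * solved.count false + q.length
decreasing_by
  have := pvMkStep_measure i (PySem.List.pyGetD graph ((nodes.getD i (0, [])).1) []) (nodes, q', solved)
  simp [List.getD_eq_getElem?_getD] at this ⊢
  omega

-- second BFS: collect child values at odd pop counters; fuel = number of pops (node count), a pure totality guard
def pvPh2Step (nodes : List (Int × List Nat)) (odd : Bool) (st : List Nat × List Int) (j : Nat) :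
    List Nat × List Int :=
  (st.1 ++ [j], if odd then st.2 ++ [(nodes.getD j (0, [])).1] else st.2)

def pvPhase2 (nodes : List (Int × List Nat)) (fuel : Nat) (q : List Nat) (count : Int)
    (answer : List Int) : List Int :=
  match fuel, q with
  | _, [] => answer
  | 0, _ :: _ => answer
  | fuel' + 1, i :: q' =>
    let st := ((nodes.getD i (0, [])).2).foldl
      (pvPh2Step nodes (decide (PySem.Int.mod count 2 ≠ 0))) (q', answer)
    pvPhase2 nodes fuel' st.1 (count + 1) st.2

def solve (N : Int) (edges : List (List Int)) : List Int :=
  let graph := pvGraph N edges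
  let tree := pvMakeTree graph [(1, [])] [0] (List.replicate (N + 1).toNat false)
  pvPhase2 tree tree.length [0] 0 []

-- ===== PORT B =====
-- one BFS over node VALUES: for each popped node, every neighbour not yet
-- discovered is marked, enqueued, and collected when the pop index is odd.
def pvBfsStep (odd : Bool) (st : List Int × List Bool × List Int) (w : Int) :
    List Int × List Bool × List Int :=
  match PySem.List.pyIdx? st.2.1.length w with
  | none => st
  | some j =>
    if st.2.1.getD j false then st
    else (st.1 ++ [w], st.2.1.set j true, if odd then st.2.2 ++ [w] else st.2.2)

theorem pvBfsStep_measure (odd : Bool) (cvs : List Int)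
    (st : List Int × List Bool × List Int) :
    2 * (cvs.foldl (pvBfsStep odd) st).2.1.count false + (cvs.foldl (pvBfsStep odd) st).1.length
      ≤ 2 * st.2.1.count false + st.1.length := by
  induction cvs generalizing st with
  | nil => simp [List.foldl]
  | cons cv cvs ih =>
    refine le_trans (ih _) ?_
    show 2 * (pvBfsStep odd st cv).2.1.count false + (pvBfsStep odd st cv).1.length ≤ _
    unfold pvBfsStep
    rcases h : PySem.List.pyIdx? st.2.1.length cv with _ | j
    · simp
    · have hj : j < st.2.1.length := pvIdx_lt h
      simp only [pvGetD_false hj]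
      rcases hf : st.2.1[j] with _ | _
      · have hc := pvCount_set hj hf
        simp [hf]
        omega
      · simp [hf]

def pvBfs (graph : List (List Int)) (q : List Int) (visited : List Bool) (index : Int)
    (answer : List Int) : List Int :=
  match q with
  | [] => answer
  | v :: q' =>
    let st := (PySem.List.pyGetD graph v []).foldl
      (pvBfsStep (decide (PySem.Int.mod index 2 = 1))) (q', visited, answer)
    pvBfs graph st.1 st.2.1 (index + 1) st.2.2
termination_by 2 * visited.count false + q.length
decreasing_by
  have := pvBfsStep_measure (decide (PySem.Int.mod index 2 = 1)) (PySem.List.pyGetD graph v []) (q', visited, answer)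
  simp [List.getD_eq_getElem?_getD] at this ⊢
  omega

def solve_alt (N : Int) (edges : List (List Int)) : List Int :=
  pvBfs (pvGraph N edges) [1] (List.replicate (N + 1).toNat false) 0 []

-- ===== PRECONDITION & SPEC =====
-- Pre_solve admits exactly the inputs where Python A returns normally: N ≥ 1 (else graph[1]
-- is an IndexError) and every edge has two endpoints whose Python indices are in range
-- for the length-(N+1) lists (else IndexError while building the graph or in the BFS).
def Pre_solve (N : Int) (edges : List (List Int)) : Prop :=
  1 ≤ N ∧ ∀ e ∈ edges, 2 ≤ e.length ∧
    PySem.Raise.InRange (N + 1).toNat (PySem.List.pyGetD e 0 0) ∧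
    PySem.Raise.InRange (N + 1).toNat (PySem.List.pyGetD e 1 0)
instance (N : Int) (edges : List (List Int)) : Decidable (Pre_solve N edges) := by
  unfold Pre_solve PySem.Raise.InRange; infer_instance

def pvWitness_solve : Int × List (List Int) := (3, [[1, 2], [1, 3]])

def Spec_solve (N : Int) (edges : List (List Int)) (out : List Int) : Prop := out = solve_alt N edges
instance (N : Int) (edges : List (List Int)) (out : List Int) : Decidable (Spec_solve N edges out) := by unfold Spec_solve; infer_instance

-- ===== CLAIM (what is proved, stated in full; the proofs are below) =====
def Claim_equal_solve : Prop := ∀ (N : Int) (edges : List (List Int)), Dom_solve N edges → Pre_solve N edges → Spec_solve N edges (solve N edges)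

-- ===== LEMMAS AND PROOFS =====

theorem pvModify_append_left {α : Type} (f : α → α) (l l' : List α) (i : Nat) (hi : i < l.length) :
    (l ++ l').modify i f = l.modify i f ++ l' := by
  apply List.ext_getElem?
  intro j
  by_cases hj : j < l.length
  · rw [List.getElem?_append_left (by simpa [List.length_modify] using hj)]
    rw [List.getElem?_modify, List.getElem?_modify, List.getElem?_append_left hj]
  · rw [List.getElem?_append_right (by simp [List.length_modify]; omega)]
    rw [List.getElem?_modify, List.getElem?_append_right (by omega)]
    have : i ≠ j := by omega
    simp [List.length_modify, this]

theorem pvModify_modify {α : Type} (f g : α → α) (l : List α) (i : Nat) :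
    (l.modify i f).modify i g = l.modify i (fun x => g (f x)) := by
  apply List.ext_getElem?
  intro j
  simp only [List.getElem?_modify]
  cases l[j]? <;> by_cases h : i = j <;> simp [h]

theorem pvGetD_modify_ne {α : Type} (f : α → α) (l : List α) {i j : Nat} (d : α) (h : i ≠ j) :
    (l.modify i f).getD j d = l.getD j d := by
  simp [List.getD_eq_getElem?_getD, List.getElem?_modify]
  cases l[j]? <;> simp [h]

theorem pvGetD_modify_self {α : Type} (f : α → α) (l : List α) {i : Nat} (d : α) (h : i < l.length) :
    (l.modify i f).getD i d = f (l.getD i d) := by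
  simp [List.getD_eq_getElem?_getD, List.getElem?_modify, List.getElem?_eq_getElem h]

theorem pvMap_range'_getD {α : Type} (d : α) : ∀ (vs pre : List α),
    (List.range' pre.length vs.length).map (fun j => (pre ++ vs).getD j d) = vs := by
  intro vs
  induction vs with
  | nil => simp
  | cons v vs ih =>
    intro pre
    have h2 := ih (pre ++ [v])
    simp only [List.length_append, List.length_cons, List.length_nil] at h2
    rw [List.length_cons, List.range'_succ, List.map_cons]
    congr 1
    · rw [List.getD_append_right _ _ _ _ (le_refl _)]
      simp
    · calc List.map (fun j => (pre ++ v :: vs).getD j d) (List.range' (pre.length + 1) vs.length)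
          = List.map (fun j => ((pre ++ [v]) ++ vs).getD j d) (List.range' (pre.length + 1) vs.length) := by
            simp
        _ = vs := h2

-- the core inner-loop correspondence: folding one adjacency list in A's make_tree
-- and in B's BFS from the same `solved` state
theorem pvInner : ∀ (cvs : List Int) (nodes : List (Int × List Nat)) (i : Nat) (qA : List Nat)
    (solved : List Bool) (qB : List Int) (ans : List Int) (odd : Bool), i < nodes.length →
    ∃ vs : List Int,
      (cvs.foldl (pvMkStep i) (nodes, qA, solved)).1
          = nodes.modify i (fun p => (p.1, p.2 ++ List.range' nodes.length vs.length))
              ++ vs.map (fun w => (w, ([] : List Nat)))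
      ∧ (cvs.foldl (pvMkStep i) (nodes, qA, solved)).2.1 = qA ++ List.range' nodes.length vs.length
      ∧ (cvs.foldl (pvMkStep i) (nodes, qA, solved)).2.2
          = (cvs.foldl (pvBfsStep odd) (qB, solved, ans)).2.1
      ∧ (cvs.foldl (pvBfsStep odd) (qB, solved, ans)).1 = qB ++ vs
      ∧ (cvs.foldl (pvBfsStep odd) (qB, solved, ans)).2.2 = ans ++ (if odd then vs else [])
      ∧ (cvs.foldl (pvBfsStep odd) (qB, solved, ans)).2.1.length = solved.length
      ∧ (cvs.foldl (pvBfsStep odd) (qB, solved, ans)).2.1.count false + vs.length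
          = solved.count false := by
  intro cvs
  induction cvs with
  | nil =>
    intro nodes i qA solved qB ans odd hi
    refine ⟨[], ?_, ?_, ?_, ?_, ?_, ?_, ?_⟩ <;> simp [List.foldl]
    exact (List.modify_id i nodes).symm
  | cons cv cvs ih =>
    intro nodes i qA solved qB ans odd hi
    simp only [List.foldl]
    show ∃ vs, (cvs.foldl (pvMkStep i) (pvMkStep i (nodes, qA, solved) cv)).1 = _ ∧ _
    rcases h : PySem.List.pyIdx? solved.length cv with _ | j
    · have hA : pvMkStep i (nodes, qA, solved) cv = (nodes, qA, solved) := by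
        simp [pvMkStep, h]
      have hB : pvBfsStep odd (qB, solved, ans) cv = (qB, solved, ans) := by
        simp [pvBfsStep, h]
      rw [hA, hB]; exact ih nodes i qA solved qB ans odd hi
    · have hj : j < solved.length := pvIdx_lt h
      rcases hf : solved[j] with _ | _
      · -- undiscovered: both sides take it
        have hA : pvMkStep i (nodes, qA, solved) cv
            = ((nodes.modify i (fun p => (p.1, p.2 ++ [nodes.length]))) ++ [(cv, [])],
               qA ++ [nodes.length], solved.set j true) := by
          simp [pvMkStep, h, List.getD_eq_getElem?_getD, List.getElem?_eq_getElem hj, hf]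
        have hB : pvBfsStep odd (qB, solved, ans) cv
            = (qB ++ [cv], solved.set j true, if odd then ans ++ [cv] else ans) := by
          simp [pvBfsStep, h, List.getD_eq_getElem?_getD, List.getElem?_eq_getElem hj, hf]
        rw [hA, hB]
        have hi' : i < ((nodes.modify i (fun p => (p.1, p.2 ++ [nodes.length]))) ++ [(cv, ([] : List Nat))]).length := by
          simp [List.length_modify]; omega
        obtain ⟨vs, e1, e2, e3, e4, e5, e6, e7⟩ := ih _ i (qA ++ [nodes.length]) (solved.set j true)
          (qB ++ [cv]) (if odd then ans ++ [cv] else ans) odd hi'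
        have hlen1 : ((nodes.modify i (fun p => (p.1, p.2 ++ [nodes.length]))) ++ [(cv, ([] : List Nat))]).length
            = nodes.length + 1 := by simp [List.length_modify]
        refine ⟨cv :: vs, ?_, ?_, ?_, ?_, ?_, ?_, ?_⟩
        · rw [e1, hlen1]
          rw [pvModify_append_left _ _ _ i (by simp [List.length_modify]; omega)]
          rw [pvModify_modify]
          have hfun : (fun x : Int × List Nat =>
              ((x.1, x.2 ++ [nodes.length]).1, (x.1, x.2 ++ [nodes.length]).2 ++ List.range' (nodes.length + 1) vs.length))
              = (fun p : Int × List Nat => (p.1, p.2 ++ List.range' nodes.length (vs.length + 1))) := by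
            funext p
            simp [List.range'_succ]
          rw [hfun]
          simp [List.range'_succ]
        · rw [e2, hlen1]
          simp [List.range'_succ]
        · exact e3
        · rw [e4]; simp
        · rw [e5]; cases odd <;> simp
        · rw [e6]; simp
        · have h7 := e7
          have hcs := pvCount_set hj hf
          simp only [List.length_cons]
          omega
      · -- already discovered: both sides skip
        have hA : pvMkStep i (nodes, qA, solved) cv = (nodes, qA, solved) := by
          simp [pvMkStep, h, List.getD_eq_getElem?_getD, List.getElem?_eq_getElem hj, hf]
        have hB : pvBfsStep odd (qB, solved, ans) cv = (qB, solved, ans) := by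
          simp [pvBfsStep, h, List.getD_eq_getElem?_getD, List.getElem?_eq_getElem hj, hf]
        rw [hA, hB]; exact ih nodes i qA solved qB ans odd hi

theorem pvMkFold_len (i : Nat) : ∀ (cvs : List Int) (st : List (Int × List Nat) × List Nat × List Bool),
    st.1.length ≤ (cvs.foldl (pvMkStep i) st).1.length := by
  intro cvs
  induction cvs with
  | nil => simp
  | cons cv cvs ih =>
    intro st
    refine le_trans ?_ (ih (pvMkStep i st cv))
    unfold pvMkStep
    rcases PySem.List.pyIdx? st.2.2.length cv with _ | j
    · simp
    · by_cases hb : st.2.2[j]?.getD false = true <;> simp [hb, List.length_modify]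

theorem pvMkFold_getD (i : Nat) : ∀ (cvs : List Int) (st : List (Int × List Nat) × List Nat × List Bool)
    (t : Nat), t ≠ i → t < st.1.length →
    (cvs.foldl (pvMkStep i) st).1.getD t (0, []) = st.1.getD t (0, []) := by
  intro cvs
  induction cvs with
  | nil => simp
  | cons cv cvs ih =>
    intro st t ht hlt
    have hstep : (pvMkStep i st cv).1.getD t (0, []) = st.1.getD t (0, [])
        ∧ st.1.length ≤ (pvMkStep i st cv).1.length := by
      unfold pvMkStep
      rcases PySem.List.pyIdx? st.2.2.length cv with _ | j
      · simp
      · by_cases hb : st.2.2[j]?.getD false = true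
        · simp [hb]
        · refine ⟨?_, by simp [hb, List.length_modify]⟩
          simp only [List.getD_eq_getElem?_getD, hb, Bool.false_eq_true, if_false]
          simp only [← List.getD_eq_getElem?_getD]
          rw [List.getD_append _ _ _ _ (by simpa [List.length_modify] using hlt)]
          exact pvGetD_modify_ne _ _ _ (fun h => ht h.symm)
    rw [show ((cv :: cvs).foldl (pvMkStep i) st) = cvs.foldl (pvMkStep i) (pvMkStep i st cv) from rfl]
    rw [ih _ t ht (lt_of_lt_of_le hlt hstep.2), hstep.1]

theorem pvMkFold_val (i : Nat) : ∀ (cvs : List Int) (st : List (Int × List Nat) × List Nat × List Bool)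
    (t : Nat), t < st.1.length →
    ((cvs.foldl (pvMkStep i) st).1.getD t (0, [])).1 = (st.1.getD t (0, [])).1 := by
  intro cvs
  induction cvs with
  | nil => simp
  | cons cv cvs ih =>
    intro st t hlt
    have hstep : ((pvMkStep i st cv).1.getD t (0, [])).1 = (st.1.getD t (0, [])).1
        ∧ st.1.length ≤ (pvMkStep i st cv).1.length := by
      unfold pvMkStep
      rcases PySem.List.pyIdx? st.2.2.length cv with _ | j
      · simp
      · by_cases hb : st.2.2[j]?.getD false = true
        · simp [hb]
        · refine ⟨?_, by simp [hb, List.length_modify]⟩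
          simp only [List.getD_eq_getElem?_getD, hb, Bool.false_eq_true, if_false]
          simp only [← List.getD_eq_getElem?_getD]
          rw [List.getD_append _ _ _ _ (by simpa [List.length_modify] using hlt)]
          by_cases hti : t = i
          · subst hti
            rw [pvGetD_modify_self _ _ _ (by omega)]
          · rw [pvGetD_modify_ne _ _ _ (fun h => hti h.symm)]
    rw [show ((cv :: cvs).foldl (pvMkStep i) st) = cvs.foldl (pvMkStep i) (pvMkStep i st cv) from rfl]
    rw [ih _ t (lt_of_lt_of_le hlt hstep.2), hstep.1]

theorem pvMkFold_mem (i : Nat) : ∀ (cvs : List Int) (st : List (Int × List Nat) × List Nat × List Bool)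
    (x : Nat), x ∈ (cvs.foldl (pvMkStep i) st).2.1 → x ∈ st.2.1 ∨ st.1.length ≤ x := by
  intro cvs
  induction cvs with
  | nil => intro st x hx; exact Or.inl (by simpa using hx)
  | cons cv cvs ih =>
    intro st x hx
    have hstep : (∀ y, y ∈ (pvMkStep i st cv).2.1 → y ∈ st.2.1 ∨ st.1.length ≤ y)
        ∧ st.1.length ≤ (pvMkStep i st cv).1.length := by
      unfold pvMkStep
      rcases PySem.List.pyIdx? st.2.2.length cv with _ | j
      · exact ⟨fun y hy => Or.inl hy, le_refl _⟩
      · by_cases hb : st.2.2[j]?.getD false = true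
        · simp only [List.getD_eq_getElem?_getD, hb, if_true]
          exact ⟨fun y hy => Or.inl hy, le_refl _⟩
        · simp only [List.getD_eq_getElem?_getD, hb, if_false]
          refine ⟨?_, by simp [List.length_modify]⟩
          intro y hy
          simp at hy
          rcases hy with hy | hy
          · exact Or.inl hy
          · exact Or.inr (le_of_eq hy.symm)
    rw [show ((cv :: cvs).foldl (pvMkStep i) st) = cvs.foldl (pvMkStep i) (pvMkStep i st cv) from rfl] at hx
    rcases ih _ x hx with hmem | hge
    · rcases hstep.1 x hmem with h1 | h1
      · exact Or.inl h1
      · exact Or.inr h1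
    · exact Or.inr (le_trans hstep.2 hge)

theorem pvMk_length (graph : List (List Int)) (nodes : List (Int × List Nat)) (q : List Nat)
    (solved : List Bool) : nodes.length ≤ (pvMakeTree graph nodes q solved).length := by
  induction nodes, q, solved using pvMakeTree.induct (graph := graph) with
  | case1 nodes solved => rw [pvMakeTree]
  | case2 nodes solved i q' cvs st ih =>
    rw [pvMakeTree]
    exact le_trans (show nodes.length ≤ st.1.length from pvMkFold_len i cvs (nodes, q', solved)) ih

theorem pvMk_stable (graph : List (List Int)) (nodes : List (Int × List Nat)) (q : List Nat)
    (solved : List Bool) :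
    ∀ (lo : Nat), (∀ j ∈ q, lo ≤ j) → lo ≤ nodes.length →
    ∀ t, t < lo →
    (pvMakeTree graph nodes q solved).getD t (0, []) = nodes.getD t (0, []) := by
  induction nodes, q, solved using pvMakeTree.induct (graph := graph) with
  | case1 nodes solved => intro lo _ _ t _; rw [pvMakeTree]
  | case2 nodes solved i q' cvs st ih =>
    intro lo hq hlo t ht
    rw [pvMakeTree]
    have hlen : nodes.length ≤ st.1.length := pvMkFold_len i cvs (nodes, q', solved)
    have hmem : ∀ j ∈ st.2.1, lo ≤ j := fun j hj => by
      rcases pvMkFold_mem i cvs (nodes, q', solved) j hj with hm | hg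
      · exact hq j (List.mem_cons_of_mem _ hm)
      · exact le_trans hlo hg
    have h1 := ih lo hmem (le_trans hlo hlen) t ht
    rw [h1]
    have hti : t ≠ i := by have := hq i (List.mem_cons_self ..); omega
    exact (show st.1.getD t (0, []) = nodes.getD t (0, []) from
      pvMkFold_getD i cvs (nodes, q', solved) t hti (by show t < nodes.length; omega))

theorem pvMk_val (graph : List (List Int)) (nodes : List (Int × List Nat)) (q : List Nat)
    (solved : List Bool) :
    ∀ t, t < nodes.length →
    ((pvMakeTree graph nodes q solved).getD t (0, [])).1 = (nodes.getD t (0, [])).1 := by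
  induction nodes, q, solved using pvMakeTree.induct (graph := graph) with
  | case1 nodes solved => intro t _; rw [pvMakeTree]
  | case2 nodes solved i q' cvs st ih =>
    intro t ht
    rw [pvMakeTree]
    have hlen : nodes.length ≤ st.1.length := pvMkFold_len i cvs (nodes, q', solved)
    rw [ih t (by omega)]
    exact (show (st.1.getD t (0, [])).1 = (nodes.getD t (0, [])).1 from
      pvMkFold_val i cvs (nodes, q', solved) t ht)

theorem pvOdd (a : Nat) :
    (decide (PySem.Int.mod (a : Int) 2 ≠ 0)) = (decide (PySem.Int.mod (a : Int) 2 = 1)) := by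
  rw [decide_eq_decide]
  simp only [PySem.Int.mod, Int.fmod_eq_emod]
  constructor <;> intro h <;> omega

theorem pvPh2_fold (nodes : List (Int × List Nat)) (odd : Bool) :
    ∀ (cs : List Nat) (q : List Nat) (ans : List Int),
    cs.foldl (pvPh2Step nodes odd) (q, ans)
      = (q ++ cs, ans ++ (if odd then cs.map (fun j => (nodes.getD j (0, [])).1) else [])) := by
  intro cs
  induction cs with
  | nil => simp
  | cons c cs ih =>
    intro q ans
    simp only [List.foldl, pvPh2Step]
    rw [ih]
    cases odd <;> simp

theorem solve_main : ∀ (graph : List (List Int)) (n : Nat) (nodes : List (Int × List Nat))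
    (a : Nat) (solved : List Bool) (ans : List Int),
    2 * solved.count false + (nodes.length - a) ≤ n →
    a ≤ nodes.length →
    (∀ t, a ≤ t → t < nodes.length → (nodes.getD t (0, [])).2 = []) →
    pvPhase2 (pvMakeTree graph nodes (List.range' a (nodes.length - a)) solved)
        ((pvMakeTree graph nodes (List.range' a (nodes.length - a)) solved).length - a)
        (List.range' a (nodes.length - a)) (a : Int) ans
      = pvBfs graph ((List.range' a (nodes.length - a)).map (fun j => (nodes.getD j (0, [])).1))
          solved (a : Int) ans := by
  intro graph n
  induction n with
  | zero =>
    intro nodes a solved ans hm ha he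
    have h0 : nodes.length - a = 0 := by omega
    rw [h0]
    simp [pvMakeTree, pvPhase2, pvBfs]
  | succ n ih =>
    intro nodes a solved ans hm ha he
    by_cases hend : nodes.length ≤ a
    · have h0 : nodes.length - a = 0 := by omega
      rw [h0]
      simp [pvMakeTree, pvPhase2, pvBfs]
    · have haL : a < nodes.length := Nat.lt_of_not_le hend
      -- abbreviations
      have hcons : List.range' a (nodes.length - a)
          = a :: List.range' (a + 1) (nodes.length - (a + 1)) := by
        rw [show nodes.length - a = (nodes.length - (a + 1)) + 1 from by omega, List.range'_succ]
      set R := List.range' (a + 1) (nodes.length - (a + 1)) with hR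
      set cvs := PySem.List.pyGetD graph ((nodes.getD a (0, [])).1) [] with hcvs
      set odd := decide (PySem.Int.mod (a : Int) 2 = 1) with hodd
      obtain ⟨vs, e1, e2, e3, e4, e5, e6, e7⟩ :=
        pvInner cvs nodes a R solved (R.map (fun j => (nodes.getD j (0, [])).1)) ans odd haL
      set F := cvs.foldl (pvMkStep a) (nodes, R, solved) with hF
      set G := cvs.foldl (pvBfsStep odd) (R.map (fun j => (nodes.getD j (0, [])).1), solved, ans) with hG
      set k := vs.length with hk
      have hF1len : F.1.length = nodes.length + k := by
        rw [e1]; simp [List.length_modify]; exact hk.symm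
      have hrapp : R ++ List.range' nodes.length k = List.range' (a + 1) ((nodes.length - (a + 1)) + k) := by
        have h := List.range'_append (s := a + 1) (m := nodes.length - (a + 1)) (n := k) (step := 1)
        rw [show (a + 1) + 1 * (nodes.length - (a + 1)) = nodes.length from by omega] at h
        exact h
      have hQ1 : F.2.1 = List.range' (a + 1) (F.1.length - (a + 1)) := by
        rw [e2, hrapp, hF1len, show nodes.length + k - (a + 1) = (nodes.length - (a + 1)) + k from by omega]
      -- A-side getD facts about F.1
      have hgetlow : ∀ t, t ≠ a → t < nodes.length → F.1.getD t (0, []) = nodes.getD t (0, []) := by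
        intro t ht hlt
        rw [e1, List.getD_append _ _ _ _ (by simpa [List.length_modify] using hlt)]
        exact pvGetD_modify_ne _ _ _ (fun h => ht h.symm)
      have hgeta : F.1.getD a (0, []) = ((nodes.getD a (0, [])).1, List.range' nodes.length k) := by
        rw [e1, List.getD_append _ _ _ _ (by simpa [List.length_modify] using haL)]
        rw [pvGetD_modify_self _ _ _ haL, he a (le_refl a) haL]
        simp
      have hnewmap : (List.range' nodes.length k).map (fun j => (F.1.getD j (0, [])).1) = vs := by
        have hpre : ((nodes.modify a fun p => (p.1, p.2 ++ List.range' nodes.length k)) : List (Int × List Nat)).length = nodes.length := by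
          simp [List.length_modify]
        have h := congrArg (List.map Prod.fst)
          (pvMap_range'_getD ((0 : Int), ([] : List Nat))
            (vs.map (fun w => (w, ([] : List Nat))))
            (nodes.modify a fun p => (p.1, p.2 ++ List.range' nodes.length k)))
        simp only [List.map_map, List.length_map, hpre, Function.comp_def] at h
        rw [e1, hk]
        simpa [List.getD_eq_getElem?_getD] using h
      have hempty1 : ∀ t, a + 1 ≤ t → t < F.1.length → (F.1.getD t (0, [])).2 = [] := by
        intro t ht hlt
        by_cases hlow : t < nodes.length
        · rw [hgetlow t (by omega) hlow]
          exact he t (by omega) hlow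
        · rw [e1, List.getD_append_right _ _ _ _ (by simp [List.length_modify]; omega)]
          simp only [List.getD_eq_getElem?_getD, List.getElem?_map]
          cases vs[t - (nodes.modify a fun p => (p.1, p.2 ++ List.range' nodes.length k)).length]? <;> simp
      -- unfold one step of make_tree
      have hmk : pvMakeTree graph nodes (a :: R) solved = pvMakeTree graph F.1 F.2.1 F.2.2 := by
        rw [pvMakeTree]
      rw [hcons, hmk, hQ1]
      set fin := pvMakeTree graph F.1 (List.range' (a + 1) (F.1.length - (a + 1))) F.2.2 with hfin
      have hfinlen : F.1.length ≤ fin.length := pvMk_length graph _ _ _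
      -- one step of phase 2
      have hfina : fin.getD a (0, []) = ((nodes.getD a (0, [])).1, List.range' nodes.length k) := by
        rw [hfin, pvMk_stable graph F.1 _ F.2.2 (a + 1)
          (fun j hj => (List.mem_range'_1.mp hj).1) (by omega) a (by omega)]
        exact hgeta
      have hfinmap : (List.range' nodes.length k).map (fun j => (fin.getD j (0, [])).1) = vs := by
        rw [← hnewmap]
        apply List.map_congr_left
        intro j hj
        have hjlt : j < F.1.length := by
          have := (List.mem_range'_1.mp hj).2
          omega
        rw [hfin, pvMk_val graph F.1 _ F.2.2 j hjlt]
      have hfuel : fin.length - a = (fin.length - (a + 1)) + 1 := by omega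
      rw [hfuel, pvPhase2]
      -- reduce the phase-2 inner fold
      rw [pvPh2_fold, hfina]
      simp only []
      -- unfold one step of the fused BFS
      rw [List.map_cons, pvBfs]
      -- identify the two recursive states and apply the induction hypothesis
      have hcount : F.2.2.count false + k = solved.count false := by rw [e3]; exact e7
      have ihh := ih F.1 (a + 1) F.2.2 G.2.2
        (by rw [hF1len]; omega)
        (by omega)
        hempty1
      have hBq : G.1 = (List.range' (a + 1) (F.1.length - (a + 1))).map (fun j => (F.1.getD j (0, [])).1) := by
        rw [e4, hF1len, show nodes.length + k - (a + 1) = (nodes.length - (a + 1)) + k from by omega,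
          ← hrapp, List.map_append]
        congr 1
        · apply List.map_congr_left
          intro j hj
          have h1 := (List.mem_range'_1.mp hj).1
          have h2 := (List.mem_range'_1.mp hj).2
          rw [hgetlow j (by omega) (by omega)]
        · exact hnewmap.symm
      have hans : ans ++ (if decide (PySem.Int.mod (a : Int) 2 ≠ 0) = true
            then (List.range' nodes.length k).map (fun j => (fin.getD j (0, [])).1) else []) = G.2.2 := by
        rw [hfinmap, e5, pvOdd a, hodd]
      have hcast : ((a : Int) + 1) = (((a + 1 : Nat)) : Int) := by push_cast; ring
      have hQgoal : R ++ List.range' nodes.length k = List.range' (a + 1) (F.1.length - (a + 1)) := by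
        rw [hrapp, hF1len, show nodes.length + k - (a + 1) = (nodes.length - (a + 1)) + k from by omega]
      rw [← hG, hQgoal, hans, hcast, hBq, ← e3]
      exact ihh


-- ===== VERDICT (by name: the statement is the Claim_ definition above) =====
theorem solve_spec : Claim_equal_solve := by
  intro N edges _ _
  unfold Spec_solve solve solve_alt
  have h := solve_main (pvGraph N edges) (2 * (List.replicate (N + 1).toNat false).count false + 1)
    [(1, [])] 0 (List.replicate (N + 1).toNat false) []
  simp at h
  simpa [List.range'] using h
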